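-- pv_equiv track=rewrite | github.com/vpx-ecnu/GT2GS | dp.py | dp_item_allocation
-- ===== SOURCE A (Python) =====
-- from functools import lru_cache
--
-- def dp_item_allocation(value_matrix):
--     n = len(value_matrix)    # Number of items
--     k = len(value_matrix[0]) # Number of players
--
--     @lru_cache(maxsize=None)
--     def dp_value(mask, current_player):
--         if mask == 0:
--             return 0
--         max_diff = -float('inf')
--         for i in range(n):
--             if mask & (1 << i):
--                 value = value_matrix[i][current_player]
--                 next_player = (current_player + 1) % k
--                 diff = value - dp_value(mask ^ (1 << i), next_player)
--                 if diff > max_diff: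
--                     max_diff = diff
--         return max_diff
--
--     @lru_cache(maxsize=None)
--     def dp_choice(mask, current_player):
--         if mask == 0:
--             return -1
--         max_diff = -float('inf')
--         best_choice = -1
--         for i in range(n):
--             if mask & (1 << i):
--                 value = value_matrix[i][current_player]
--                 next_player = (current_player + 1) % k
--                 diff = value - dp_value(mask ^ (1 << i), next_player)
--                 if diff > max_diff:
--                     max_diff = diff
--                     best_choice = i
--         return best_choice
--
--     # Backtracking to find the selected items
--     selected = [[] for _ in range(k)]
--     mask = (1 << n) - 1
--     current_player = 0
--
--     while mask != 0:
--         choice = dp_choice(mask, current_player)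
--         if choice != -1:
--             selected[current_player].append(choice)
--             mask ^= (1 << choice)
--             current_player = (current_player + 1) % k
--         else:
--             break
--
--     return selected
-- ===== SOURCE B (Python) =====
-- def dp_item_allocation(value_matrix):
--     n = len(value_matrix)
--     k = len(value_matrix[0])
--     size = 1 << n
--
--     def popcount(m):
--         c = 0
--         while m:
--             c += m & 1
--             m >>= 1
--         return c
--
--     # Bottom-up tables: best_val[mask], best_choice[mask]; index 0 is the base case.
--     best_val = [0]
--     best_choice = [-1]
--     for mask in range(1, size):
--         cp = (n - popcount(mask)) % k
--         bv = None
--         bc = -1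
--         for i in range(n):
--             if mask & (1 << i):
--                 d = value_matrix[i][cp] - best_val[mask ^ (1 << i)]
--                 if bv is None or d > bv:
--                     bv = d
--                     bc = i
--         best_val.append(bv)
--         best_choice.append(bc)
--
--     selected = [[] for _ in range(k)]
--     mask = size - 1
--     cp = 0
--     while mask != 0:
--         c = best_choice[mask]
--         selected[cp].append(c)
--         mask ^= (1 << c)
--         cp = (cp + 1) % k
--     return selected
-- ===== Notes on version B (the rewrite author's own statement) =====
-- stated objective: alternative
-- what changed: Replaces the two lru_cache'd top-down recursions (dp_value/dp_choice) by a single bottom-up pass that fills best_val/best_choice tables for every bitmask in increasing order, recovering the current player from the mask's popcount, then backtracks reading the tables.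
import Mathlib
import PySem

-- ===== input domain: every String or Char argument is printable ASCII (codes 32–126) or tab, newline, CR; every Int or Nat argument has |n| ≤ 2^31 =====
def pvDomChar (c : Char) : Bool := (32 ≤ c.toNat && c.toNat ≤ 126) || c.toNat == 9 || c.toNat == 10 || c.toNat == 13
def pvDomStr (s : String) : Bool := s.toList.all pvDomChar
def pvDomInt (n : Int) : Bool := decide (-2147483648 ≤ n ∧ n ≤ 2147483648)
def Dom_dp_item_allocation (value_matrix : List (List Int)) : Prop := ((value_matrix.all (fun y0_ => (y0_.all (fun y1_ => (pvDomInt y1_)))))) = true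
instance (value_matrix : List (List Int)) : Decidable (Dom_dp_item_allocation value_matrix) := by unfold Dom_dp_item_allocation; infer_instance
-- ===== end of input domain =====

-- B replaces A's two lru_cache'd recursions (dp_value / dp_choice) by one bottom-up pass that fills
-- best_val/best_choice tables for every mask in increasing order (current player recovered from the
-- popcount of the mask), then backtracks reading the tables; same return value, no recursion.

-- ===== PORT A =====
-- A memoizes dp_value with an unbounded lru_cache keyed by (mask, current_player). Every call the
-- entry point triggers has mask < 2^n, so the cache is ported as an array of size 2^n indexed by
-- mask holding the (current_player, value) pair cached for that mask (each mask is only ever queried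
-- with a single current_player, so this is exactly the cache's content; on a player mismatch the
-- port recomputes, i.e. behaves as a cache miss). dp_choice's own lru_cache is never hit (the
-- backtracking loop queries each mask at most once), so it is ported without that cache.
-- max_diff is modelled as Option Int, none standing for the initial -float('inf'); recursion is by
-- fuel, and fuel > mask always suffices since mask ^ (1 << i) < mask for a set bit.
-- value_matrix[i][current_player] is ported as getD _ 0: exact on Pre_ (index always in range there).
abbrev pvMemo : Type := Array (Option (Nat × Int))

-- one step of dp_value's inner loop; val sub memo recursively evaluates dp_value(sub, next_player)
def pvAValStepM (vm : List (List Int)) (cp mask : Nat) (val : Nat → pvMemo → Int × pvMemo)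
    (acc : Option Int × pvMemo) (i : Nat) : Option Int × pvMemo :=
  if mask &&& (1 <<< i) ≠ 0 then
    let r := val (mask ^^^ (1 <<< i)) acc.2
    let diff := (vm.getD i []).getD cp 0 - r.1
    (match acc.1 with
     | none => some diff
     | some md => if diff > md then some diff else some md, r.2)
  else acc

def pvAValM (vm : List (List Int)) (n k : Nat) :
    Nat → Nat → Nat → pvMemo → Int × pvMemo
  | 0, _, _, memo => (0, memo)   -- fuel exhausted: unreachable, fuel > mask is maintained
  | fuel+1, mask, cp, memo =>
    let cached : Option Int :=
      match memo.getD mask none with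
      | some cv => if cv.1 = cp then some cv.2 else none
      | none => none
    match cached with
    | some v => (v, memo)
    | none =>
      if mask = 0 then (0, memo.setIfInBounds mask (some (cp, 0)))
      else
        let q := (List.range n).foldl
          (pvAValStepM vm cp mask (fun sub m => pvAValM vm n k fuel sub ((cp + 1) % k) m))
          (none, memo)
        -- q.1.getD 0 stands for the unreachable 'no set bit below n' case (Python's -inf survives only there)
        (q.1.getD 0, q.2.setIfInBounds mask (some (cp, q.1.getD 0)))

-- one step of dp_choice's inner loop, additionally tracking best_choice (initially -1)
def pvAPairStepM (vm : List (List Int)) (cp mask : Nat) (val : Nat → pvMemo → Int × pvMemo)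
    (acc : (Option Int × Int) × pvMemo) (i : Nat) : (Option Int × Int) × pvMemo :=
  if mask &&& (1 <<< i) ≠ 0 then
    let r := val (mask ^^^ (1 <<< i)) acc.2
    let diff := (vm.getD i []).getD cp 0 - r.1
    (match acc.1.1 with
     | none => (some diff, (i : Int))
     | some md => if diff > md then (some diff, (i : Int)) else acc.1, r.2)
  else acc

def pvAChoiceM (vm : List (List Int)) (n k mask cp : Nat) (memo : pvMemo) : Int × pvMemo :=
  if mask = 0 then (-1, memo)
  else
    let q := (List.range n).foldl
      (pvAPairStepM vm cp mask (fun sub m => pvAValM vm n k mask sub ((cp + 1) % k) m))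
      ((none, -1), memo)
    (q.1.2, q.2)

-- while mask != 0: choice = dp_choice(mask, cp); if choice != -1: append, clear bit, advance player;
-- else break (fuel n suffices: each iteration clears a set bit); the dp_value cache is threaded through
def pvABackM (vm : List (List Int)) (n k : Nat) :
    Nat → Nat → Nat → List (List Int) → pvMemo → List (List Int)
  | 0, _, _, selected, _ => selected
  | fuel+1, mask, cp, selected, memo =>
    if mask = 0 then selected
    else
      let r := pvAChoiceM vm n k mask cp memo
      if r.1 ≠ -1 then
        pvABackM vm n k fuel (mask ^^^ (1 <<< r.1.toNat)) ((cp + 1) % k)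
          (selected.set cp ((selected.getD cp []) ++ [r.1])) r.2
      else selected

def dp_item_allocation (value_matrix : List (List Int)) : List (List Int) :=
  let n := value_matrix.length
  let k := (value_matrix.headD []).length   -- value_matrix[0]: Pre_ excludes the empty matrix
  pvABackM value_matrix n k n ((1 <<< n) - 1) 0 (List.replicate k [])
    (Array.replicate (1 <<< n) none)

-- ===== PORT B =====
-- popcount via the shift loop in Source B
def pvPopcount (m : Nat) : Nat :=
  if h : m = 0 then 0 else m % 2 + pvPopcount (m / 2)
decreasing_by exact Nat.div_lt_self (Nat.pos_of_ne_zero h) Nat.one_lt_two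

-- inner loop of the table pass: 'if bv is None or d > bv' is Option.all
def pvBPairStep (g : Nat → Int) (mask : Nat) (acc : Option Int × Int) (i : Nat) : Option Int × Int :=
  if mask &&& (1 <<< i) ≠ 0 then
    if acc.1.all (fun v => decide (g i > v)) then (some (g i), (i : Int)) else acc
  else acc

-- for mask in range(1, size): append (best_val[mask], best_choice[mask]); index 0 holds the base case.
-- pvBTables m = the tables after processing masks 1..m (the for loop is a fold over range(1, m+1)).
-- p.1.getD 0 stands for the unreachable 'bv is None' case (mask in 1..2^n-1 always has a set bit < n)
def pvBTables (vm : List (List Int)) (n k : Nat) (m : Nat) : List Int × List Int :=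
  (List.range' 1 m).foldl
    (fun t mask =>
      let cp := (n - pvPopcount mask) % k
      let p := (List.range n).foldl
        (pvBPairStep (fun i => (vm.getD i []).getD cp 0 - t.1.getD (mask ^^^ (1 <<< i)) 0) mask)
        (none, -1)
      (t.1 ++ [p.1.getD 0], t.2 ++ [p.2]))
    ([0], [-1])

-- while mask != 0: c = best_choice[mask]; append, clear bit, advance player (fuel n suffices)
def pvBBack (k : Nat) (bc : List Int) : Nat → Nat → Nat → List (List Int) → List (List Int)
  | 0, _, _, selected => selected
  | fuel+1, mask, cp, selected =>
    if mask = 0 then selected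
    else
      let c := bc.getD mask 0
      pvBBack k bc fuel (mask ^^^ (1 <<< c.toNat)) ((cp + 1) % k)
        (selected.set cp ((selected.getD cp []) ++ [c]))

def dp_item_allocation_alt (value_matrix : List (List Int)) : List (List Int) :=
  let n := value_matrix.length
  let k := (value_matrix.headD []).length
  let size := 1 <<< n
  let bc := (pvBTables value_matrix n k (size - 1)).2
  pvBBack k bc n (size - 1) 0 (List.replicate k [])

-- ===== PRECONDITION & SPEC =====
-- Pre_ is exactly where Python A returns normally: a nonempty matrix whose first row is nonempty
-- (else IndexError on value_matrix[0] / value_matrix[i][0]) and every row long enough for each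
-- player index the DP actually reaches, i.e. of length ≥ min(n, k) (else IndexError).
def Pre_dp_item_allocation (value_matrix : List (List Int)) : Prop :=
  value_matrix ≠ [] ∧ 0 < (value_matrix.headD []).length ∧
    ∀ r ∈ value_matrix, min value_matrix.length (value_matrix.headD []).length ≤ r.length

instance (value_matrix : List (List Int)) : Decidable (Pre_dp_item_allocation value_matrix) := by
  unfold Pre_dp_item_allocation; infer_instance

def pvWitness_dp_item_allocation : List (List Int) := [[3, 1], [2, 5], [4, 4]]

def Spec_dp_item_allocation (value_matrix : List (List Int)) (out : List (List Int)) : Prop := out = dp_item_allocation_alt value_matrix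
instance (value_matrix : List (List Int)) (out : List (List Int)) : Decidable (Spec_dp_item_allocation value_matrix out) := by unfold Spec_dp_item_allocation; infer_instance

-- ===== CLAIM (what is proved, stated in full; the proofs are below) =====
def Claim_equal_dp_item_allocation : Prop := ∀ (value_matrix : List (List Int)), Dom_dp_item_allocation value_matrix → Pre_dp_item_allocation value_matrix → Spec_dp_item_allocation value_matrix (dp_item_allocation value_matrix)

-- ===== LEMMAS AND PROOFS =====

-- Pure (cache-free) reference versions of A's recursion; used only by the proofs: the memoized
-- port is first proved equal to these, which are then proved equal to B's tables.
-- Inner loop of dp_value: for i in range(n): if mask & (1 << i): diff = g i; if diff > max_diff: ...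
-- max_diff is modelled as Option Int, none standing for the initial -float('inf').
def pvAValStep (g : Nat → Int) (mask : Nat) (acc : Option Int) (i : Nat) : Option Int :=
  if mask &&& (1 <<< i) ≠ 0 then
    match acc with
    | none => some (g i)
    | some md => if g i > md then some (g i) else some md
  else acc

-- dp_value(mask, current_player), memoization replaced by fuel-indexed recursion (fuel > mask
-- always suffices since mask ^ (1 << i) < mask for a set bit; fuel 0 is unreachable).
-- value_matrix[i][current_player] is ported as getD _ 0: exact on Pre_ (index always in range there).
def pvAVal (vm : List (List Int)) (n k : Nat) : Nat → Nat → Nat → Int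
  | 0, _, _ => 0
  | fuel+1, mask, cp =>
    if mask = 0 then 0
    else
      -- .getD 0 stands for the unreachable 'no set bit below n' case (Python's -inf survives only there)
      ((List.range n).foldl
        (pvAValStep (fun i => (vm.getD i []).getD cp 0 - pvAVal vm n k fuel (mask ^^^ (1 <<< i)) ((cp + 1) % k)) mask)
        none).getD 0

-- Inner loop of dp_choice: additionally tracks best_choice (initially -1).
def pvAPairStep (g : Nat → Int) (mask : Nat) (acc : Option Int × Int) (i : Nat) : Option Int × Int :=
  if mask &&& (1 <<< i) ≠ 0 then
    match acc.1 with
    | none => (some (g i), (i : Int))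
    | some md => if g i > md then (some (g i), (i : Int)) else acc
  else acc

def pvAChoice (vm : List (List Int)) (n k mask cp : Nat) : Int :=
  if mask = 0 then -1
  else
    ((List.range n).foldl
      (pvAPairStep (fun i => (vm.getD i []).getD cp 0 - pvAVal vm n k mask (mask ^^^ (1 <<< i)) ((cp + 1) % k)) mask)
      (none, -1)).2

-- while mask != 0: choice = dp_choice(mask, cp); if choice != -1: append, clear bit, advance player; else break
-- (fuel n suffices: each iteration clears a set bit; with fuel exhausted the current 'selected' is returned)
def pvABack (vm : List (List Int)) (n k : Nat) : Nat → Nat → Nat → List (List Int) → List (List Int)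
  | 0, _, _, selected => selected
  | fuel+1, mask, cp, selected =>
    if mask = 0 then selected
    else
      let choice := pvAChoice vm n k mask cp
      if choice ≠ -1 then
        pvABack vm n k fuel (mask ^^^ (1 <<< choice.toNat)) ((cp + 1) % k)
          (selected.set cp ((selected.getD cp []) ++ [choice]))
      else selected


theorem pv_tables_succ_eq (vm : List (List Int)) (n k m : Nat) :
    pvBTables vm n k (m + 1) =
      (let t := pvBTables vm n k m
       let mask := m + 1
       let cp := (n - pvPopcount mask) % k
       let p := (List.range n).foldl
         (pvBPairStep (fun i => (vm.getD i []).getD cp 0 - t.1.getD (mask ^^^ (1 <<< i)) 0) mask)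
         (none, -1)
       (t.1 ++ [p.1.getD 0], t.2 ++ [p.2])) := by
  unfold pvBTables
  rw [List.range'_1_concat, List.foldl_append]
  simp only [List.foldl_cons, List.foldl_nil, Nat.add_comm 1 m]

theorem pv_and_pow (m i : Nat) : (m &&& (1 <<< i) ≠ 0) ↔ m.testBit i = true := by
  rw [Nat.one_shiftLeft, Nat.and_two_pow]
  cases h : m.testBit i <;> simp

theorem pv_xor_sub' : ∀ (i m : Nat), m.testBit i = true → m ^^^ 2 ^ i = m - 2 ^ i := by
  intro i
  induction i with
  | zero =>
    intro m h
    rw [Nat.testBit_zero] at h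
    have hodd : Odd m := Nat.odd_iff.mpr (by simpa using h)
    simpa using Nat.xor_one_of_odd hodd
  | succ i ih =>
    intro m h
    rw [Nat.testBit_add_one] at h
    have hle : 2 ^ i ≤ m / 2 := Nat.ge_two_pow_of_testBit h
    have hmod : (m ^^^ 2 ^ (i + 1)) % 2 = (m + 2 ^ (i + 1)) % 2 := Nat.xor_mod_two_eq
    have hdiv : (m ^^^ 2 ^ (i + 1)) / 2 = (m / 2) ^^^ 2 ^ i := by
      have h2 : 2 ^ (i + 1) >>> 1 = 2 ^ i := by
        rw [Nat.shiftRight_one, Nat.pow_succ, Nat.mul_div_cancel _ (by norm_num)]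
      calc (m ^^^ 2 ^ (i + 1)) / 2 = (m ^^^ 2 ^ (i + 1)) >>> 1 := (Nat.shiftRight_one _).symm
        _ = m >>> 1 ^^^ 2 ^ (i + 1) >>> 1 := Nat.shiftRight_xor_distrib
        _ = (m / 2) ^^^ 2 ^ i := by rw [Nat.shiftRight_one, h2]
    have hih : (m / 2) ^^^ 2 ^ i = m / 2 - 2 ^ i := ih (m / 2) h
    have hx := Nat.div_add_mod (m ^^^ 2 ^ (i + 1)) 2
    have hm := Nat.div_add_mod m 2
    have hpow : 2 ^ (i + 1) = 2 * 2 ^ i := by ring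
    omega

theorem pv_xor_sub {m i : Nat} (h : m.testBit i = true) : m ^^^ (1 <<< i) = m - 2 ^ i := by
  rw [Nat.one_shiftLeft]
  exact pv_xor_sub' i m h

theorem pv_sub_lt {m i : Nat} (h : m.testBit i = true) : m - 2 ^ i < m := by
  have h1 := Nat.ge_two_pow_of_testBit h
  have h2 := Nat.two_pow_pos i
  omega

theorem pv_pc_zero : pvPopcount 0 = 0 := by rw [pvPopcount]; simp

theorem pv_pc_eq (m : Nat) : pvPopcount m = m % 2 + pvPopcount (m / 2) := by
  by_cases h : m = 0
  · subst h; rw [pvPopcount]; simp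
  · rw [pvPopcount]; simp [h]

theorem pv_pc_sub' : ∀ (i m : Nat), m.testBit i = true → pvPopcount (m - 2 ^ i) + 1 = pvPopcount m := by
  intro i
  induction i with
  | zero =>
    intro m h
    rw [Nat.testBit_zero] at h
    have h1 : m % 2 = 1 := by simpa using h
    have e2 : (m - 1) / 2 = m / 2 := by omega
    have e0 : m - 2 ^ 0 = m - 1 := by simp
    rw [e0, pv_pc_eq (m - 1), e2, pv_pc_eq m]
    omega
  | succ i ih =>
    intro m h
    rw [Nat.testBit_add_one] at h
    have hle : 2 ^ i ≤ m / 2 := Nat.ge_two_pow_of_testBit h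
    have hpow : 2 ^ (i + 1) = 2 * 2 ^ i := by ring
    have hm := Nat.div_add_mod m 2
    have e1 : (m - 2 ^ (i + 1)) % 2 = m % 2 := by omega
    have e2 : (m - 2 ^ (i + 1)) / 2 = m / 2 - 2 ^ i := by omega
    have hih := ih (m / 2) h
    rw [pv_pc_eq m, pv_pc_eq (m - 2 ^ (i + 1)), e1, e2]
    omega

theorem pv_pc_sub {m i : Nat} (h : m.testBit i = true) : pvPopcount (m - 2 ^ i) + 1 = pvPopcount m :=
  pv_pc_sub' i m h

theorem pv_pc_le' : ∀ (n m : Nat), m < 2 ^ n → pvPopcount m ≤ n := by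
  intro n
  induction n with
  | zero =>
    intro m h
    have : m = 0 := by simpa using Nat.lt_one_iff.mp (by simpa using h)
    subst this
    simp [pv_pc_zero]
  | succ n ih =>
    intro m h
    have hpow : 2 ^ (n + 1) = 2 * 2 ^ n := by ring
    have h2 : m / 2 < 2 ^ n := by omega
    have := ih (m / 2) h2
    rw [pv_pc_eq m]
    omega

theorem pv_pc_le {n m : Nat} (h : m < 2 ^ n) : pvPopcount m ≤ n := pv_pc_le' n m h

theorem pv_pc_pow_sub_one (n : Nat) : pvPopcount (2 ^ n - 1) = n := by
  induction n with
  | zero => simpa using pv_pc_zero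
  | succ n ih =>
    have hpow : 2 ^ (n + 1) = 2 * 2 ^ n := by ring
    have h1 : 1 ≤ 2 ^ n := Nat.one_le_two_pow
    have e1 : (2 ^ (n + 1) - 1) % 2 = 1 := by omega
    have e2 : (2 ^ (n + 1) - 1) / 2 = 2 ^ n - 1 := by omega
    rw [pv_pc_eq, e1, e2, ih]
    omega

theorem pv_testBit_lt {m n i : Nat} (h : m.testBit i = true) (hm : m < 2 ^ n) : i < n := by
  have h1 := Nat.ge_two_pow_of_testBit h
  by_contra hc
  have : 2 ^ n ≤ 2 ^ i := Nat.pow_le_pow_right (by omega) (by omega)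
  omega

theorem pv_exists_bit {m n : Nat} (h : m ≠ 0) (hm : m < 2 ^ n) :
    ∃ i, i < n ∧ m.testBit i = true := by
  obtain ⟨i, hi⟩ := Nat.exists_testBit_of_ne_zero h
  exact ⟨i, pv_testBit_lt hi hm, hi⟩

theorem pv_cp_step {n k mask j : Nat} (hb : mask.testBit j = true) (hm : mask < 2 ^ n) :
    ((n - pvPopcount mask) % k + 1) % k = (n - pvPopcount (mask - 2 ^ j)) % k := by
  have h1 := pv_pc_sub hb
  have h2 := pv_pc_le hm
  rw [Nat.mod_add_mod]
  congr 1
  omega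

theorem pv_step_fst (g : Nat → Int) (mask : Nat) (p : Option Int × Int) (i : Nat) :
    (pvAPairStep g mask p i).1 = pvAValStep g mask p.1 i := by
  unfold pvAPairStep pvAValStep
  by_cases hb : mask &&& (1 <<< i) ≠ 0
  · simp only [if_pos hb]
    cases hp : p.1 with
    | none => rfl
    | some md => dsimp only; split_ifs <;> simp [hp]
  · simp [hb]

theorem pv_fold_fst (g : Nat → Int) (mask : Nat) :
    ∀ (l : List Nat) (p : Option Int × Int),
      (l.foldl (pvAPairStep g mask) p).1 = l.foldl (pvAValStep g mask) p.1 := by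
  intro l
  induction l with
  | nil => intro p; rfl
  | cons i l ih => intro p; simp only [List.foldl]; rw [ih, pv_step_fst]

theorem pv_step_AB (g g' : Nat → Int) (mask i : Nat)
    (h : mask.testBit i = true → g i = g' i) (acc : Option Int × Int) :
    pvAPairStep g mask acc i = pvBPairStep g' mask acc i := by
  unfold pvAPairStep pvBPairStep
  by_cases hb : mask &&& (1 <<< i) ≠ 0
  · have hg := h ((pv_and_pow mask i).mp hb)
    simp only [if_pos hb]
    cases hacc : acc.1 with
    | none => simp [hg]
    | some md =>
      simp only [← hg, Option.all_some, gt_iff_lt, decide_eq_true_eq]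
  · simp [hb]

theorem pv_fold_AB (g g' : Nat → Int) (mask : Nat) :
    ∀ (l : List Nat) (p : Option Int × Int), (∀ i ∈ l, mask.testBit i = true → g i = g' i) →
      l.foldl (pvAPairStep g mask) p = l.foldl (pvBPairStep g' mask) p := by
  intro l
  induction l with
  | nil => intro p _; rfl
  | cons i l ih =>
    intro p h
    simp only [List.foldl]
    rw [pv_step_AB g g' mask i (h i (by simp)) p]
    exact ih _ (fun j hj => h j (by simp [hj]))

theorem pv_tables_len (vm : List (List Int)) (n k : Nat) :
    ∀ m, (pvBTables vm n k m).1.length = m + 1 ∧ (pvBTables vm n k m).2.length = m + 1 := by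
  intro m
  induction m with
  | zero => simp [pvBTables]
  | succ m ih => rw [pv_tables_succ_eq]; simp [ih.1, ih.2]

theorem pv_tables_succ (vm : List (List Int)) (n k m : Nat) :
    ∃ x y, pvBTables vm n k (m + 1) =
      ((pvBTables vm n k m).1 ++ [x], (pvBTables vm n k m).2 ++ [y]) :=
  ⟨_, _, pv_tables_succ_eq vm n k m⟩

theorem pv_tables_prefix (vm : List (List Int)) (n k : Nat) :
    ∀ m j, j ≤ m →
      (pvBTables vm n k m).1.getD j 0 = (pvBTables vm n k j).1.getD j 0 ∧
      (pvBTables vm n k m).2.getD j 0 = (pvBTables vm n k j).2.getD j 0 := by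
  intro m
  induction m with
  | zero => intro j hj; have : j = 0 := by omega
            subst this; exact ⟨rfl, rfl⟩
  | succ m ih =>
    intro j hj
    by_cases hje : j = m + 1
    · subst hje; exact ⟨rfl, rfl⟩
    · have hj' : j ≤ m := by omega
      have hlen := pv_tables_len vm n k m
      obtain ⟨x, y, hxy⟩ := pv_tables_succ vm n k m
      rw [hxy]
      constructor
      · show ((pvBTables vm n k m).1 ++ [x]).getD j 0 = _
        rw [List.getD_append _ _ _ _ (by omega)]
        exact (ih j hj').1
      · show ((pvBTables vm n k m).2 ++ [y]).getD j 0 = _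
        rw [List.getD_append _ _ _ _ (by omega)]
        exact (ih j hj').2

theorem pv_getD_concat (l : List Int) (a d : Int) : (l ++ [a]).getD l.length d = a := by
  simp [List.getD_eq_getElem?_getD]

theorem pv_table_eq (vm : List (List Int)) (n k : Nat) :
    ∀ mask, mask < 2 ^ n →
      (∀ f, mask < f →
        (pvBTables vm n k mask).1.getD mask 0 =
          pvAVal vm n k f mask ((n - pvPopcount mask) % k)) ∧
      (pvBTables vm n k mask).2.getD mask 0 =
        pvAChoice vm n k mask ((n - pvPopcount mask) % k) := by
  intro mask
  induction mask using Nat.strong_induction_on with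
  | _ mask ih =>
    intro hm
    cases mask with
    | zero =>
      constructor
      · intro f hf
        obtain ⟨a, rfl⟩ : ∃ a, f = a + 1 := ⟨f - 1, by omega⟩
        simp [pvBTables, pvAVal]
      · simp [pvBTables, pvAChoice]
    | succ m =>
      have hlen := pv_tables_len vm n k m
      -- pointwise agreement of the two inner-loop diff functions, for any sufficient fuel F
      have hpt : ∀ F, m < F → ∀ i ∈ List.range n, (m + 1).testBit i = true →
          ((vm.getD i []).getD ((n - pvPopcount (m + 1)) % k) 0 -
            pvAVal vm n k F ((m + 1) ^^^ (1 <<< i)) (((n - pvPopcount (m + 1)) % k + 1) % k)) =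
          ((vm.getD i []).getD ((n - pvPopcount (m + 1)) % k) 0 -
            (pvBTables vm n k m).1.getD ((m + 1) ^^^ (1 <<< i)) 0) := by
        intro F hF i _ hbit
        have hsub : (m + 1) ^^^ (1 <<< i) = m + 1 - 2 ^ i := pv_xor_sub hbit
        have hlt : m + 1 - 2 ^ i < m + 1 := pv_sub_lt hbit
        have hsub2 : m + 1 - 2 ^ i < 2 ^ n := by omega
        have hpre := (pv_tables_prefix vm n k m (m + 1 - 2 ^ i) (by omega)).1
        have hih := (ih (m + 1 - 2 ^ i) hlt hsub2).1 F (by omega)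
        rw [hsub, hpre, hih, pv_cp_step hbit hm]
      constructor
      · intro f hf
        obtain ⟨a, rfl⟩ : ∃ a, f = a + 1 := ⟨f - 1, by omega⟩
        rw [pv_tables_succ_eq]
        simp only []
        have e1 : ∀ x : Int, ((pvBTables vm n k m).1 ++ [x]).getD (m + 1) 0 = x := by
          intro x
          have h := pv_getD_concat (pvBTables vm n k m).1 x 0
          rwa [hlen.1] at h
        rw [e1]
        simp only [pvAVal, if_neg (by omega : ¬ m + 1 = 0)]
        rw [← pv_fold_AB _ _ _ _ _ (hpt a (by omega)),
          pv_fold_fst]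
      · rw [pv_tables_succ_eq]
        simp only []
        have e2 : ∀ y : Int, ((pvBTables vm n k m).2 ++ [y]).getD (m + 1) 0 = y := by
          intro y
          have h := pv_getD_concat (pvBTables vm n k m).2 y 0
          rwa [hlen.2] at h
        rw [e2]
        simp only [pvAChoice, if_neg (by omega : ¬ m + 1 = 0)]
        rw [← pv_fold_AB _ _ _ _ _ (hpt (m + 1) (by omega))]

theorem pv_fold_good (g : Nat → Int) (n mask : Nat) :
    ∀ (l : List Nat) (p : Option Int × Int), (∀ i ∈ l, i < n) →
      (p = (none, -1) ∨ ∃ j, j < n ∧ mask.testBit j = true ∧ p.2 = (j : Int)) →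
      ((l.foldl (pvAPairStep g mask) p = p ∧ ∀ i ∈ l, mask.testBit i = false) ∨
        ∃ j, j < n ∧ mask.testBit j = true ∧ (l.foldl (pvAPairStep g mask) p).2 = (j : Int)) := by
  intro l
  induction l with
  | nil =>
    intro p _ hp
    rcases hp with hp | hp
    · exact Or.inl ⟨rfl, by simp⟩
    · exact Or.inr hp
  | cons i l ih =>
    intro p hlt hp
    simp only [List.foldl]
    by_cases hbit : mask.testBit i = true
    · have hstep : ∃ j, j < n ∧ mask.testBit j = true ∧ (pvAPairStep g mask p i).2 = (j : Int) := by
        unfold pvAPairStep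
        rw [if_pos ((pv_and_pow mask i).mpr hbit)]
        cases hp1 : p.1 with
        | none => exact ⟨i, hlt i (by simp), hbit, by simp⟩
        | some md =>
          dsimp only
          split_ifs
          · exact ⟨i, hlt i (by simp), hbit, by simp⟩
          · rcases hp with hp | ⟨j, hj, hbj, he⟩
            · rw [hp] at hp1; simp at hp1
            · exact ⟨j, hj, hbj, he⟩
      rcases ih (pvAPairStep g mask p i) (fun j hj => hlt j (by simp [hj])) (Or.inr hstep) with
        ⟨heq, _⟩ | hgood
      · exact Or.inr (by rw [heq]; exact hstep)
      · exact Or.inr hgood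
    · have hstep : pvAPairStep g mask p i = p := by
        unfold pvAPairStep
        rw [if_neg (by simpa [pv_and_pow] using hbit)]
      rw [hstep]
      rcases ih p (fun j hj => hlt j (by simp [hj])) hp with ⟨heq, hall⟩ | hgood
      · exact Or.inl ⟨heq, by
          intro i' hi'
          rcases List.mem_cons.mp hi' with rfl | hi'
          · simpa using hbit
          · exact hall i' hi'⟩
      · exact Or.inr hgood

theorem pv_fold_choice_good (g : Nat → Int) (n mask : Nat) (h0 : mask ≠ 0) (hm : mask < 2 ^ n) :
    ∃ j, j < n ∧ mask.testBit j = true ∧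
      ((List.range n).foldl (pvAPairStep g mask) (none, -1)).2 = (j : Int) := by
  obtain ⟨j0, hj0, hb0⟩ := pv_exists_bit h0 hm
  rcases pv_fold_good g n mask (List.range n) (none, -1) (by intro i hi; simpa using hi)
      (Or.inl rfl) with ⟨_, hall⟩ | hgood
  · have := hall j0 (by simpa using hj0)
    rw [hb0] at this; cases this
  · exact hgood

theorem pv_choice_good (vm : List (List Int)) (n k mask cp : Nat)
    (h0 : mask ≠ 0) (hm : mask < 2 ^ n) :
    ∃ j, j < n ∧ mask.testBit j = true ∧ pvAChoice vm n k mask cp = (j : Int) := by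
  unfold pvAChoice
  rw [if_neg h0]
  exact pv_fold_choice_good _ n mask h0 hm

theorem pv_back_eq (vm : List (List Int)) (n k : Nat) :
    ∀ fuel mask cp sel, mask < 2 ^ n → cp = (n - pvPopcount mask) % k →
      pvABack vm n k fuel mask cp sel =
        pvBBack k (pvBTables vm n k (2 ^ n - 1)).2 fuel mask cp sel := by
  intro fuel
  induction fuel with
  | zero => intro mask cp sel _ _; rfl
  | succ fuel ih =>
    intro mask cp sel hm hcp
    by_cases h0 : mask = 0
    · subst h0; simp [pvABack, pvBBack]
    · obtain ⟨j, hj, hbj, hch⟩ := pv_choice_good vm n k mask cp h0 hm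
      have hc : (pvBTables vm n k (2 ^ n - 1)).2.getD mask 0 = (j : Int) := by
        have hble : mask ≤ 2 ^ n - 1 := by omega
        rw [(pv_tables_prefix vm n k (2 ^ n - 1) mask hble).2,
          (pv_table_eq vm n k mask hm).2, ← hcp, hch]
      have hsub : mask ^^^ (1 <<< j) = mask - 2 ^ j := pv_xor_sub hbj
      have hlt : mask - 2 ^ j < mask := pv_sub_lt hbj
      have hcp' : (cp + 1) % k = (n - pvPopcount (mask - 2 ^ j)) % k := by
        rw [hcp]; exact pv_cp_step hbj hm
      simp only [pvABack, pvBBack, if_neg h0]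
      rw [hch, hc, if_pos (by omega : (j : Int) ≠ -1)]
      have htn : ((j : Int)).toNat = j := Int.toNat_natCast j
      rw [htn]
      exact ih (mask ^^^ (1 <<< j)) ((cp + 1) % k) _ (by rw [hsub]; omega) (by rw [hsub, hcp'])


theorem pv_step_val_congr (g g' : Nat → Int) (mask i : Nat)
    (h : mask.testBit i = true → g i = g' i) (acc : Option Int) :
    pvAValStep g mask acc i = pvAValStep g' mask acc i := by
  unfold pvAValStep
  by_cases hb : mask &&& (1 <<< i) ≠ 0
  · have hg := h ((pv_and_pow mask i).mp hb)
    simp [hb, hg]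
  · simp [hb]

theorem pv_fold_val_congr (g g' : Nat → Int) (mask : Nat) :
    ∀ (l : List Nat) (a : Option Int), (∀ i ∈ l, mask.testBit i = true → g i = g' i) →
      l.foldl (pvAValStep g mask) a = l.foldl (pvAValStep g' mask) a := by
  intro l
  induction l with
  | nil => intro a _; rfl
  | cons i l ih =>
    intro a h
    simp only [List.foldl]
    rw [pv_step_val_congr g g' mask i (h i (by simp)) a]
    exact ih _ (fun j hj => h j (by simp [hj]))

theorem pv_val_fuel (vm : List (List Int)) (n k : Nat) :
    ∀ mask, ∀ f1 f2, mask < f1 → mask < f2 → ∀ cp,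
      pvAVal vm n k f1 mask cp = pvAVal vm n k f2 mask cp := by
  intro mask
  induction mask using Nat.strong_induction_on with
  | _ mask ih =>
    intro f1 f2 h1 h2 cp
    obtain ⟨a, rfl⟩ : ∃ a, f1 = a + 1 := ⟨f1 - 1, by omega⟩
    obtain ⟨b, rfl⟩ : ∃ b, f2 = b + 1 := ⟨f2 - 1, by omega⟩
    by_cases h0 : mask = 0
    · subst h0; rfl
    · simp only [pvAVal, if_neg h0]
      congr 1
      apply pv_fold_val_congr
      intro i _ hbit
      have hsub : mask ^^^ (1 <<< i) = mask - 2 ^ i := pv_xor_sub hbit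
      have hlt : mask - 2 ^ i < mask := pv_sub_lt hbit
      rw [hsub]
      exact congrArg (_ - ·) (ih _ hlt a b (by omega) (by omega) _)

-- ----- the memoized port equals the pure reference recursion -----

theorem pv_agetD (a : pvMemo) (j : Nat) (d : Option (Nat × Int)) :
    a.getD j d = (a[j]?).getD d := by
  unfold Array.getD
  split
  · next h => rw [Array.getElem?_eq_getElem h]; rfl
  · next h => rw [Array.getElem?_eq_none (by omega)]; rfl

-- every cache entry is a correct dp_value result
def pvMemoOK (vm : List (List Int)) (n k : Nat) (memo : pvMemo) : Prop :=
  ∀ m c v, memo.getD m none = some (c, v) → v = pvAVal vm n k (m + 1) m c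

theorem pv_memoOK_empty (vm : List (List Int)) (n k sz : Nat) :
    pvMemoOK vm n k (Array.replicate sz none) := by
  intro m c v h
  rw [pv_agetD, Array.getElem?_replicate] at h
  split_ifs at h <;> simp at h

theorem pv_memoOK_set (vm : List (List Int)) (n k : Nat) (memo : pvMemo) (m c : Nat) (v : Int)
    (hOK : pvMemoOK vm n k memo) (hv : v = pvAVal vm n k (m + 1) m c) :
    pvMemoOK vm n k (memo.setIfInBounds m (some (c, v))) := by
  intro m' c' v' h
  rw [pv_agetD, Array.getElem?_setIfInBounds] at h
  split_ifs at h with h1 h2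
  · subst h1
    simp at h
    obtain ⟨hc, hv'⟩ := h
    subst hc; subst hv'; exact hv
  · simp at h
  · rw [← pv_agetD] at h
    exact hOK m' c' v' h

theorem pv_foldM_val (vm : List (List Int)) (n k mask cp : Nat)
    (val : Nat → pvMemo → Int × pvMemo)
    (hval : ∀ sub memo', sub < mask → pvMemoOK vm n k memo' →
      (val sub memo').1 = pvAVal vm n k mask sub ((cp + 1) % k) ∧
      pvMemoOK vm n k (val sub memo').2) :
    ∀ (l : List Nat) (acc : Option Int) (memo : pvMemo), pvMemoOK vm n k memo →
      (l.foldl (pvAValStepM vm cp mask val) (acc, memo)).1 =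
        l.foldl (pvAValStep (fun i => (vm.getD i []).getD cp 0 -
          pvAVal vm n k mask (mask ^^^ (1 <<< i)) ((cp + 1) % k)) mask) acc ∧
      pvMemoOK vm n k (l.foldl (pvAValStepM vm cp mask val) (acc, memo)).2 := by
  intro l
  induction l with
  | nil => intro acc memo hOK; exact ⟨rfl, hOK⟩
  | cons i l ih =>
    intro acc memo hOK
    simp only [List.foldl]
    by_cases hb : mask &&& (1 <<< i) ≠ 0
    · have hbit := (pv_and_pow mask i).mp hb
      have hlt : mask ^^^ (1 <<< i) < mask := by
        rw [pv_xor_sub hbit]; exact pv_sub_lt hbit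
      obtain ⟨he, hOK'⟩ := hval (mask ^^^ (1 <<< i)) memo hlt hOK
      have hstep : pvAValStepM vm cp mask val (acc, memo) i =
          (pvAValStep (fun i => (vm.getD i []).getD cp 0 -
            pvAVal vm n k mask (mask ^^^ (1 <<< i)) ((cp + 1) % k)) mask acc i,
           (val (mask ^^^ (1 <<< i)) memo).2) := by
        unfold pvAValStepM pvAValStep
        rw [if_pos hb, if_pos hb]
        simp only [he]
      rw [hstep]
      exact ih _ _ hOK'
    · have hstep : pvAValStepM vm cp mask val (acc, memo) i = (acc, memo) := by
        unfold pvAValStepM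
        rw [if_neg hb]
      have hstep' : pvAValStep (fun i => (vm.getD i []).getD cp 0 -
          pvAVal vm n k mask (mask ^^^ (1 <<< i)) ((cp + 1) % k)) mask acc i = acc := by
        unfold pvAValStep
        rw [if_neg hb]
      rw [hstep, hstep']
      exact ih _ _ hOK


theorem pv_valM_compute (vm : List (List Int)) (n k mask f' cp : Nat) (memo : pvMemo)
    (hf : mask < f' + 1) (hOK : pvMemoOK vm n k memo)
    (ih : ∀ s, s < mask → ∀ f cp' memo', s < f → pvMemoOK vm n k memo' →
      (pvAValM vm n k f s cp' memo').1 = pvAVal vm n k (s + 1) s cp' ∧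
      pvMemoOK vm n k (pvAValM vm n k f s cp' memo').2) :
    ((if mask = 0 then ((0 : Int), memo.setIfInBounds mask (some (cp, (0 : Int))))
      else
        let q := (List.range n).foldl
          (pvAValStepM vm cp mask (fun sub m => pvAValM vm n k f' sub ((cp + 1) % k) m))
          (none, memo)
        (q.1.getD 0, q.2.setIfInBounds mask (some (cp, q.1.getD 0)))) : Int × pvMemo).1 =
      pvAVal vm n k (mask + 1) mask cp ∧
    pvMemoOK vm n k
      ((if mask = 0 then ((0 : Int), memo.setIfInBounds mask (some (cp, (0 : Int))))
        else
          let q := (List.range n).foldl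
            (pvAValStepM vm cp mask (fun sub m => pvAValM vm n k f' sub ((cp + 1) % k) m))
            (none, memo)
          (q.1.getD 0, q.2.setIfInBounds mask (some (cp, q.1.getD 0)))) : Int × pvMemo).2 := by
  have hval : ∀ sub memo', sub < mask → pvMemoOK vm n k memo' →
      ((fun sub m => pvAValM vm n k f' sub ((cp + 1) % k) m) sub memo').1 =
        pvAVal vm n k mask sub ((cp + 1) % k) ∧
      pvMemoOK vm n k ((fun sub m => pvAValM vm n k f' sub ((cp + 1) % k) m) sub memo').2 := by
    intro sub memo' hs hOK'
    obtain ⟨h1, h2⟩ := ih sub hs f' ((cp + 1) % k) memo' (by omega) hOK'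
    refine ⟨?_, h2⟩
    rw [h1]
    exact pv_val_fuel vm n k sub (sub + 1) mask (by omega) hs _
  by_cases h0 : mask = 0
  · subst h0
    simp only [if_true]
    refine ⟨by simp [pvAVal], ?_⟩
    exact pv_memoOK_set vm n k memo 0 cp 0 hOK (by simp [pvAVal])
  · simp only [if_neg h0]
    obtain ⟨hq1, hq2⟩ :=
      pv_foldM_val vm n k mask cp _ hval (List.range n) none memo hOK
    have hv : ((List.range n).foldl
        (pvAValStepM vm cp mask (fun sub m => pvAValM vm n k f' sub ((cp + 1) % k) m))
        (none, memo)).1.getD 0 = pvAVal vm n k (mask + 1) mask cp := by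
      rw [hq1]
      simp only [pvAVal, if_neg h0]
    exact ⟨hv, pv_memoOK_set vm n k _ mask cp _ hq2 hv⟩

theorem pv_valM_eq (vm : List (List Int)) (n k : Nat) :
    ∀ mask f cp memo, mask < f → pvMemoOK vm n k memo →
      (pvAValM vm n k f mask cp memo).1 = pvAVal vm n k (mask + 1) mask cp ∧
      pvMemoOK vm n k (pvAValM vm n k f mask cp memo).2 := by
  intro mask
  induction mask using Nat.strong_induction_on with
  | _ mask ih =>
    intro f cp memo hf hOK
    obtain ⟨f', rfl⟩ : ∃ f', f = f' + 1 := ⟨f - 1, by omega⟩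
    simp only [pvAValM]
    cases hc : memo.getD mask none with
    | some cv =>
      by_cases hcp : cv.1 = cp
      · have := hOK mask cv.1 cv.2 (by rw [hc])
        simp only [if_pos hcp]
        rw [← hcp]
        exact ⟨this, hOK⟩
      · simp only [if_neg hcp]
        exact pv_valM_compute vm n k mask f' cp memo hf hOK (fun s hs => ih s hs)
    | none =>
      exact pv_valM_compute vm n k mask f' cp memo hf hOK (fun s hs => ih s hs)


theorem pv_foldM_pair (vm : List (List Int)) (n k mask cp : Nat)
    (val : Nat → pvMemo → Int × pvMemo)
    (hval : ∀ sub memo', sub < mask → pvMemoOK vm n k memo' →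
      (val sub memo').1 = pvAVal vm n k mask sub ((cp + 1) % k) ∧
      pvMemoOK vm n k (val sub memo').2) :
    ∀ (l : List Nat) (accp : Option Int × Int) (memo : pvMemo), pvMemoOK vm n k memo →
      (l.foldl (pvAPairStepM vm cp mask val) (accp, memo)).1 =
        l.foldl (pvAPairStep (fun i => (vm.getD i []).getD cp 0 -
          pvAVal vm n k mask (mask ^^^ (1 <<< i)) ((cp + 1) % k)) mask) accp ∧
      pvMemoOK vm n k (l.foldl (pvAPairStepM vm cp mask val) (accp, memo)).2 := by
  intro l
  induction l with
  | nil => intro accp memo hOK; exact ⟨rfl, hOK⟩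
  | cons i l ih =>
    intro accp memo hOK
    simp only [List.foldl]
    by_cases hb : mask &&& (1 <<< i) ≠ 0
    · have hbit := (pv_and_pow mask i).mp hb
      have hlt : mask ^^^ (1 <<< i) < mask := by
        rw [pv_xor_sub hbit]; exact pv_sub_lt hbit
      obtain ⟨he, hOK'⟩ := hval (mask ^^^ (1 <<< i)) memo hlt hOK
      have hstep : pvAPairStepM vm cp mask val (accp, memo) i =
          (pvAPairStep (fun i => (vm.getD i []).getD cp 0 -
            pvAVal vm n k mask (mask ^^^ (1 <<< i)) ((cp + 1) % k)) mask accp i,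
           (val (mask ^^^ (1 <<< i)) memo).2) := by
        unfold pvAPairStepM pvAPairStep
        rw [if_pos hb, if_pos hb]
        simp only [he]
      rw [hstep]
      exact ih _ _ hOK'
    · have hstep : pvAPairStepM vm cp mask val (accp, memo) i = (accp, memo) := by
        unfold pvAPairStepM
        rw [if_neg hb]
      have hstep' : pvAPairStep (fun i => (vm.getD i []).getD cp 0 -
          pvAVal vm n k mask (mask ^^^ (1 <<< i)) ((cp + 1) % k)) mask accp i = accp := by
        unfold pvAPairStep
        rw [if_neg hb]
      rw [hstep, hstep']
      exact ih _ _ hOK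

theorem pv_choiceM_eq (vm : List (List Int)) (n k mask cp : Nat) (memo : pvMemo)
    (hOK : pvMemoOK vm n k memo) :
    (pvAChoiceM vm n k mask cp memo).1 = pvAChoice vm n k mask cp ∧
    pvMemoOK vm n k (pvAChoiceM vm n k mask cp memo).2 := by
  by_cases h0 : mask = 0
  · subst h0
    simp only [pvAChoiceM, pvAChoice]
    exact ⟨rfl, hOK⟩
  · have hval : ∀ sub memo', sub < mask → pvMemoOK vm n k memo' →
        ((fun sub m => pvAValM vm n k mask sub ((cp + 1) % k) m) sub memo').1 =
          pvAVal vm n k mask sub ((cp + 1) % k) ∧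
        pvMemoOK vm n k ((fun sub m => pvAValM vm n k mask sub ((cp + 1) % k) m) sub memo').2 := by
      intro sub memo' hs hOK'
      obtain ⟨h1, h2⟩ := pv_valM_eq vm n k sub mask ((cp + 1) % k) memo' hs hOK'
      refine ⟨?_, h2⟩
      rw [h1]
      exact pv_val_fuel vm n k sub (sub + 1) mask (by omega) hs _
    obtain ⟨hq1, hq2⟩ :=
      pv_foldM_pair vm n k mask cp _ hval (List.range n) (none, -1) memo hOK
    simp only [pvAChoiceM, pvAChoice, if_neg h0]
    exact ⟨by rw [hq1], hq2⟩

theorem pv_backM_eq (vm : List (List Int)) (n k : Nat) :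
    ∀ fuel mask cp sel memo, pvMemoOK vm n k memo →
      pvABackM vm n k fuel mask cp sel memo = pvABack vm n k fuel mask cp sel := by
  intro fuel
  induction fuel with
  | zero => intro mask cp sel memo _; rfl
  | succ fuel ih =>
    intro mask cp sel memo hOK
    by_cases h0 : mask = 0
    · subst h0; simp [pvABackM, pvABack]
    · obtain ⟨he, hOK'⟩ := pv_choiceM_eq vm n k mask cp memo hOK
      simp only [pvABackM, pvABack, if_neg h0]
      rw [he]
      split_ifs
      · rw [ih _ _ _ _ hOK']
      · rfl

-- ===== VERDICT (by name: the statement is the Claim_ definition above) =====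
theorem dp_item_allocation_spec : Claim_equal_dp_item_allocation := by
  intro vm _ _
  unfold Spec_dp_item_allocation
  simp only [dp_item_allocation, dp_item_allocation_alt, Nat.one_shiftLeft]
  have h1 : 2 ^ vm.length - 1 < 2 ^ vm.length := by
    have := Nat.two_pow_pos vm.length; omega
  have h2 : (0 : Nat) =
      (vm.length - pvPopcount (2 ^ vm.length - 1)) % (vm.headD []).length := by
    rw [pv_pc_pow_sub_one]; simp
  rw [pv_backM_eq vm vm.length (vm.headD []).length vm.length (2 ^ vm.length - 1) 0 _ _
    (pv_memoOK_empty vm vm.length (vm.headD []).length (2 ^ vm.length))]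
  exact pv_back_eq vm vm.length (vm.headD []).length vm.length (2 ^ vm.length - 1) 0 _ h1 h2
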